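-- pv_equiv track=rewrite | github.com/gchallen/illinois-salary-parity | analyze_parity.py | is_clean_appointment
-- ===== SOURCE A (Python) =====
-- def is_clean_appointment(faculty_entry):
--     """
--     Check if this is a clean single-track appointment (not split research/teaching).
--     """
--     faculty_positions = [p for p in faculty_entry['positions']
--                         if p['empl_class'] in ('AA', 'AB', 'AL', 'AM')]
--
--     if not faculty_positions:
--         return False
--
--     # Check if all faculty positions are the same track
--     titles = [p['title'].upper() for p in faculty_positions]
--
--     has_teaching = any('TCH' in t or 'TEACHING' in t or 'LECTURER' in t for t in titles)
--     has_research = any('RES ' in t for t in titles)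
--     has_tenure_track = any('PROF' in t and 'TCH' not in t and 'RES' not in t and 'TEACHING' not in t
--                           for t in titles)
--
--     # Clean if only one track
--     tracks = sum([has_teaching, has_research, has_tenure_track])
--     return tracks <= 1
-- ===== SOURCE B (Python) =====
-- def is_clean_appointment(faculty_entry):
--     """
--     Check if this is a clean single-track appointment (not split research/teaching).
--     Streaming bitmask: one loop over the raw positions (no intermediate lists),
--     OR-ing a 3-bit track mask per faculty title and failing fast with the
--     power-of-two test mask & (mask - 1) as soon as two tracks coexist.
--     """
--     mask = 0
--     seen = False
--     for p in faculty_entry['positions']: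
--         if p['empl_class'] not in ('AA', 'AB', 'AL', 'AM'):
--             continue
--         seen = True
--         t = p['title'].upper()
--         bit = 0
--         if 'TCH' in t or 'TEACHING' in t or 'LECTURER' in t:
--             bit |= 1
--         if 'RES ' in t:
--             bit |= 2
--         if 'PROF' in t and 'TCH' not in t and 'RES' not in t and 'TEACHING' not in t:
--             bit |= 4
--         mask |= bit
--         if mask & (mask - 1):
--             return False
--     return seen
-- ===== Notes on version B (the rewrite author's own statement) =====
-- stated objective: alternative
-- what changed: Replaces A's filter-to-a-list, titles list, three independent any() scans and a boolean sum by a single streaming loop over the raw positions that ORs a 3-bit track mask per faculty title and fails fast with the power-of-two test mask & (mask - 1) as soon as two tracks coexist; the seen flag replaces the empty-filter guard.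
import Mathlib
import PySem

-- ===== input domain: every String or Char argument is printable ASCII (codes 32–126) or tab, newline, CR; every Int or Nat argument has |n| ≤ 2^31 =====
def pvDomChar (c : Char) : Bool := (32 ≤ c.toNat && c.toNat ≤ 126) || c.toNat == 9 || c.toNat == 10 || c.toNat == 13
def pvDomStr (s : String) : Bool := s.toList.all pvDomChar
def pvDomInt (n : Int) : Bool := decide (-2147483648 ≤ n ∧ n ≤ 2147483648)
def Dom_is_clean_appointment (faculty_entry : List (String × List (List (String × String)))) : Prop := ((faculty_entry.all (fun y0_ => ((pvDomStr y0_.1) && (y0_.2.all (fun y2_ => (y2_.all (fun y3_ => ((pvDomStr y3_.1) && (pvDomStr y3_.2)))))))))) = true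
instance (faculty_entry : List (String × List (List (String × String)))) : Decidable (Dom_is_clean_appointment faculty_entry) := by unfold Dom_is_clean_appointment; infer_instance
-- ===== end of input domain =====

-- B replaces A's filter + titles list + three any() scans + boolean sum by one streaming loop
-- over the raw positions OR-ing a 3-bit track mask and failing fast with mask & (mask-1)
-- (alternative decomposition, same asymptotic cost).


-- ===== PORT A =====
-- literal transliteration of A: filter, empty guard, titles list, three any() scans, sum ≤ 1
def is_clean_appointment (faculty_entry : List (String × List (List (String × String)))) : Bool :=
  match PySem.Dict.get? (PySem.Dict.ofList faculty_entry) "positions" with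
  | none => false  -- KeyError, excluded by Pre_
  | some positions =>
    let faculty_positions := positions.filter (fun p =>
      ["AA", "AB", "AL", "AM"].contains ((PySem.Dict.get? (PySem.Dict.ofList p) "empl_class").getD ""))
      -- missing 'empl_class' / 'title' keys raise KeyError; excluded by Pre_, getD default unreachable there
    if faculty_positions.isEmpty then false
    else
      let titles := faculty_positions.map (fun p => PySem.Str.upper ((PySem.Dict.get? (PySem.Dict.ofList p) "title").getD ""))
      let has_teaching := titles.any (fun t =>
        PySem.Str.isIn "TCH" t || PySem.Str.isIn "TEACHING" t || PySem.Str.isIn "LECTURER" t)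
      let has_research := titles.any (fun t => PySem.Str.isIn "RES " t)
      let has_tenure_track := titles.any (fun t =>
        PySem.Str.isIn "PROF" t && !PySem.Str.isIn "TCH" t && !PySem.Str.isIn "RES" t &&
          !PySem.Str.isIn "TEACHING" t)
      let tracks : Int :=
        [has_teaching, has_research, has_tenure_track].foldl
          (fun a b => a + (if b then 1 else 0)) 0
      decide (tracks ≤ 1)

-- ===== PORT B =====
-- B's loop: streaming over the raw positions, state (mask, seen), early return False
-- when mask & (mask - 1) is nonzero (two tracks present)
def pvLoopB : List (List (String × String)) → Int → Bool → Bool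
  | [], _, seen => seen
  | p :: ps, mask, seen =>
    if !(["AA", "AB", "AL", "AM"].contains ((PySem.Dict.get? (PySem.Dict.ofList p) "empl_class").getD "")) then
      pvLoopB ps mask seen          -- continue
    else
      let t := PySem.Str.upper ((PySem.Dict.get? (PySem.Dict.ofList p) "title").getD "")
      let bit : Int := 0
      let bit := if PySem.Str.isIn "TCH" t || PySem.Str.isIn "TEACHING" t || PySem.Str.isIn "LECTURER" t
                 then PySem.Int.bor bit 1 else bit
      let bit := if PySem.Str.isIn "RES " t then PySem.Int.bor bit 2 else bit
      let bit := if PySem.Str.isIn "PROF" t && !PySem.Str.isIn "TCH" t && !PySem.Str.isIn "RES" t &&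
                    !PySem.Str.isIn "TEACHING" t then PySem.Int.bor bit 4 else bit
      let mask := PySem.Int.bor mask bit
      if PySem.Int.band mask (mask - 1) ≠ 0 then false   -- early return False
      else pvLoopB ps mask true

def is_clean_appointment_alt (faculty_entry : List (String × List (List (String × String)))) : Bool :=
  match PySem.Dict.get? (PySem.Dict.ofList faculty_entry) "positions" with
  | none => false  -- KeyError, excluded by Pre_
  | some positions => pvLoopB positions 0 false

-- ===== PRECONDITION & SPEC =====
-- Pre_ excludes exactly the KeyErrors: a missing positions key, a position without
-- empl_class, or a faculty-class position without title.
def Pre_is_clean_appointment (faculty_entry : List (String × List (List (String × String)))) : Prop :=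
  (PySem.Dict.get? (PySem.Dict.ofList faculty_entry) "positions").isSome = true ∧
  ∀ p ∈ (PySem.Dict.get? (PySem.Dict.ofList faculty_entry) "positions").getD [],
    (PySem.Dict.get? (PySem.Dict.ofList p) "empl_class").isSome = true ∧
    (((PySem.Dict.get? (PySem.Dict.ofList p) "empl_class").getD "") ∈ ["AA", "AB", "AL", "AM"] →
      (PySem.Dict.get? (PySem.Dict.ofList p) "title").isSome = true)
-- Example admitted entry: [("positions", [[("empl_class", "AA"), ("title", "Asst Prof")],
-- [("empl_class", "AL"), ("title", "Lecturer")], [("empl_class", "XX")]])]; an entry whose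
-- faculty-class position lacks the title key is excluded (KeyError in A).
instance (faculty_entry : List (String × List (List (String × String)))) : Decidable (Pre_is_clean_appointment faculty_entry) := by unfold Pre_is_clean_appointment; infer_instance

def pvWitness_is_clean_appointment : (List (String × List (List (String × String)))) :=
  [("positions", [[("empl_class", "AA"), ("title", "Asst Prof")],
                  [("empl_class", "XX")]])]

def Spec_is_clean_appointment (faculty_entry : List (String × List (List (String × String)))) (out : Bool) : Prop := out = is_clean_appointment_alt faculty_entry
instance (faculty_entry : List (String × List (List (String × String)))) (out : Bool) : Decidable (Spec_is_clean_appointment faculty_entry out) := by unfold Spec_is_clean_appointment; infer_instance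

-- ===== CLAIM (what is proved, stated in full; the proofs are below) =====
def Claim_equal_is_clean_appointment : Prop := ∀ (faculty_entry : List (String × List (List (String × String)))), Dom_is_clean_appointment faculty_entry → Pre_is_clean_appointment faculty_entry → Spec_is_clean_appointment faculty_entry (is_clean_appointment faculty_entry)

-- ===== LEMMAS AND PROOFS =====

-- per-title track tags and per-position faculty test (abbreviations used only by the proofs)
def pvTagT (t : String) : Bool :=
  PySem.Str.isIn "TCH" t || PySem.Str.isIn "TEACHING" t || PySem.Str.isIn "LECTURER" t
def pvTagR (t : String) : Bool := PySem.Str.isIn "RES " t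
def pvTagP (t : String) : Bool :=
  PySem.Str.isIn "PROF" t && !PySem.Str.isIn "TCH" t && !PySem.Str.isIn "RES" t &&
    !PySem.Str.isIn "TEACHING" t
def pvFac (p : List (String × String)) : Bool :=
  ["AA", "AB", "AL", "AM"].contains ((PySem.Dict.get? (PySem.Dict.ofList p) "empl_class").getD "")
def pvTitle (p : List (String × String)) : String :=
  PySem.Str.upper ((PySem.Dict.get? (PySem.Dict.ofList p) "title").getD "")

-- rfl bridges from the ports' inline expressions to the named abbreviations
lemma pvF_def : (fun p : List (String × String) =>
    ["AA", "AB", "AL", "AM"].contains ((PySem.Dict.get? (PySem.Dict.ofList p) "empl_class").getD "")) = pvFac := rfl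
lemma pvT_def (p : List (String × String)) :
    (PySem.Str.isIn "TCH" (PySem.Str.upper ((PySem.Dict.get? (PySem.Dict.ofList p) "title").getD "")) ||
     PySem.Str.isIn "TEACHING" (PySem.Str.upper ((PySem.Dict.get? (PySem.Dict.ofList p) "title").getD "")) ||
     PySem.Str.isIn "LECTURER" (PySem.Str.upper ((PySem.Dict.get? (PySem.Dict.ofList p) "title").getD ""))) =
      pvTagT (pvTitle p) := rfl
lemma pvR_def (p : List (String × String)) :
    PySem.Str.isIn "RES " (PySem.Str.upper ((PySem.Dict.get? (PySem.Dict.ofList p) "title").getD "")) =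
      pvTagR (pvTitle p) := rfl
lemma pvP_def (p : List (String × String)) :
    (PySem.Str.isIn "PROF" (PySem.Str.upper ((PySem.Dict.get? (PySem.Dict.ofList p) "title").getD "")) &&
     !PySem.Str.isIn "TCH" (PySem.Str.upper ((PySem.Dict.get? (PySem.Dict.ofList p) "title").getD "")) &&
     !PySem.Str.isIn "RES" (PySem.Str.upper ((PySem.Dict.get? (PySem.Dict.ofList p) "title").getD "")) &&
     !PySem.Str.isIn "TEACHING" (PySem.Str.upper ((PySem.Dict.get? (PySem.Dict.ofList p) "title").getD ""))) =
      pvTagP (pvTitle p) := rfl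

-- the 3-bit mask built from three presence flags, and the "at most one track" test
def pvMk (a b c : Bool) : Int :=
  PySem.Int.bor (PySem.Int.bor (if a then 1 else 0) (if b then 2 else 0)) (if c then 4 else 0)
def pvAtM (a b c : Bool) : Bool := !((a && b) || (a && c) || (b && c))

-- the zeta-reduced shape of B's sequential bit-building equals pvMk
lemma pvBit_eq (a b c : Bool) :
    (if c then PySem.Int.bor (if b then PySem.Int.bor (if a then PySem.Int.bor 0 1 else 0) 2
                              else (if a then PySem.Int.bor 0 1 else 0)) 4
     else (if b then PySem.Int.bor (if a then PySem.Int.bor 0 1 else 0) 2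
           else (if a then PySem.Int.bor 0 1 else 0))) = pvMk a b c := by
  cases a <;> cases b <;> cases c <;> decide

lemma pvMk_or (a b c a' b' c' : Bool) :
    PySem.Int.bor (pvMk a b c) (pvMk a' b' c') = pvMk (a || a') (b || b') (c || c') := by
  cases a <;> cases b <;> cases c <;> cases a' <;> cases b' <;> cases c' <;> decide

lemma pvConflict (a b c : Bool) :
    (PySem.Int.band (pvMk a b c) (pvMk a b c - 1) ≠ 0) ↔ pvAtM a b c = false := by
  cases a <;> cases b <;> cases c <;> decide

lemma pvAtM_mono : ∀ a b c x y z : Bool,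
    pvAtM a b c = false → pvAtM (a || x) (b || y) (c || z) = false := by decide

-- B's loop equals "seen a faculty position" AND "at most one track", given the
-- invariant that the incoming mask already has at most one bit
lemma pvLoopB_eq (ps : List (List (String × String))) :
    ∀ (a b c seen : Bool), pvAtM a b c = true →
    pvLoopB ps (pvMk a b c) seen =
      ((seen || ps.any pvFac) &&
        pvAtM (a || ps.any (fun p => pvFac p && pvTagT (pvTitle p)))
              (b || ps.any (fun p => pvFac p && pvTagR (pvTitle p)))
              (c || ps.any (fun p => pvFac p && pvTagP (pvTitle p)))) := by
  induction ps with
  | nil => intro a b c seen h; simp [pvLoopB, h]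
  | cons p ps ih =>
    intro a b c seen h
    rw [pvLoopB]
    rw [show (!(["AA", "AB", "AL", "AM"].contains ((PySem.Dict.get? (PySem.Dict.ofList p) "empl_class").getD ""))) = !(pvFac p) from rfl]
    cases hf : pvFac p with
    | false =>
      rw [Bool.not_false, if_pos rfl, ih _ _ _ seen h]
      simp [List.any_cons, hf]
    | true =>
      rw [Bool.not_true, if_neg Bool.false_ne_true]
      dsimp only
      rw [pvBit_eq, pvMk_or]
      simp only [pvT_def, pvR_def, pvP_def]
      cases hc : pvAtM (a || pvTagT (pvTitle p)) (b || pvTagR (pvTitle p)) (c || pvTagP (pvTitle p)) with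
      | true =>
        rw [if_neg (by rw [pvConflict]; simp [hc]), ih _ _ _ true hc]
        simp [List.any_cons, hf, Bool.or_assoc]
      | false =>
        rw [if_pos ((pvConflict _ _ _).2 hc)]
        have hm := pvAtM_mono _ _ _ (ps.any (fun p => pvFac p && pvTagT (pvTitle p)))
          (ps.any (fun p => pvFac p && pvTagR (pvTitle p)))
          (ps.any (fun p => pvFac p && pvTagP (pvTitle p))) hc
        simp only [List.any_cons, hf, Bool.true_and, Bool.or_assoc] at hm ⊢
        rw [hm, Bool.and_false]

lemma pvLoopB_zero (ps : List (List (String × String))) :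
    pvLoopB ps 0 false =
      (ps.any pvFac &&
        pvAtM (ps.any (fun p => pvFac p && pvTagT (pvTitle p)))
              (ps.any (fun p => pvFac p && pvTagR (pvTitle p)))
              (ps.any (fun p => pvFac p && pvTagP (pvTitle p)))) := by
  have h := pvLoopB_eq ps false false false false (by decide)
  rw [show pvMk false false false = 0 from by decide] at h
  simpa using h

lemma pvFilterEmpty (ps : List (List (String × String))) :
    (ps.filter pvFac).isEmpty = !(ps.any pvFac) := by
  induction ps with
  | nil => rfl
  | cons p ps ih => rw [List.filter_cons, List.any_cons]; cases hp : pvFac p <;> simp [ih]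

lemma pvSum_atM (a b c : Bool) :
    decide (([a, b, c].foldl (fun x y => x + (if y then (1 : Int) else 0)) 0) <= 1) = pvAtM a b c := by
  cases a <;> cases b <;> cases c <;> decide

-- ===== VERDICT (by name: the statement is the Claim_ definition above) =====
theorem is_clean_appointment_spec : Claim_equal_is_clean_appointment := by
  intro fe _ _
  unfold Spec_is_clean_appointment is_clean_appointment is_clean_appointment_alt
  cases hps : PySem.Dict.get? (PySem.Dict.ofList fe) "positions" with
  | none => rfl
  | some positions =>
    dsimp only
    rw [pvF_def, pvSum_atM, pvFilterEmpty, pvLoopB_zero]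
    simp only [List.any_map, List.any_filter]
    cases hany : positions.any pvFac with
    | false => simp
    | true =>
      rw [Bool.not_true, if_neg Bool.false_ne_true, Bool.true_and]
      rw [show (fun t => PySem.Str.isIn "TCH" t || PySem.Str.isIn "TEACHING" t || PySem.Str.isIn "LECTURER" t) = pvTagT from rfl,
         show (fun t => PySem.Str.isIn "RES " t) = pvTagR from rfl,
         show (fun t => PySem.Str.isIn "PROF" t && !PySem.Str.isIn "TCH" t && !PySem.Str.isIn "RES" t && !PySem.Str.isIn "TEACHING" t) = pvTagP from rfl]
      rw [show pvTitle = (fun p => PySem.Str.upper ((PySem.Dict.get? (PySem.Dict.ofList p) "title").getD "")) from rfl]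
      rfl
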